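-- pv_equiv track=rewrite | github.com/qonteo/luna | fsm2_linux_rel_v.2.0.0/common/majority_voting.py | getVoters
-- ===== SOURCE A (Python) =====
-- def getVoters(searchResults):
--     """
--     Getting voters by search results.
--
--     :param searchResults: search results, responses from luna api with candidates and similarity + filed "score of event
--     :type searchResults: list
--     :return: dict, keys - id of person or descriptor.
--     """
--     res = []
--
--     for searchResult in searchResults:
--         for candidate in searchResult["candidates"]:
--             if "person_id" in candidate:
--                 res.append(candidate["person_id"])
--             else:
--                 res.append(candidate["id"])
--
--     res = list(set(res))
--     return {voter: {"similarity": 0, "vote": 0, "count": 0} for voter in res}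
-- ===== SOURCE B (Python) =====
-- def getVoters(searchResults):
--     n = len(searchResults)
--     if n == 0:
--         return {}
--     if n == 1:
--         d = {}
--         for candidate in searchResults[0]["candidates"]:
--             key = candidate["person_id"] if "person_id" in candidate else candidate["id"]
--             d[key] = {"similarity": 0, "vote": 0, "count": 0}
--         return d
--     mid = n // 2
--     d = getVoters(searchResults[:mid])
--     d.update(getVoters(searchResults[mid:]))
--     return d
-- ===== Notes on version B (the rewrite author's own statement) =====
-- stated objective: alternative
-- what changed: B is a divide-and-conquer recursion: it splits the search-result list in half, recursively builds each half's voter dict (the base case inserts zeroed counters keyed by person_id-or-id, deduping by key overwrite) and merges the halves with dict.update, replacing A's three staged passes (collect ids into a list, dedup via set(), dict comprehension).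
import Mathlib
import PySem

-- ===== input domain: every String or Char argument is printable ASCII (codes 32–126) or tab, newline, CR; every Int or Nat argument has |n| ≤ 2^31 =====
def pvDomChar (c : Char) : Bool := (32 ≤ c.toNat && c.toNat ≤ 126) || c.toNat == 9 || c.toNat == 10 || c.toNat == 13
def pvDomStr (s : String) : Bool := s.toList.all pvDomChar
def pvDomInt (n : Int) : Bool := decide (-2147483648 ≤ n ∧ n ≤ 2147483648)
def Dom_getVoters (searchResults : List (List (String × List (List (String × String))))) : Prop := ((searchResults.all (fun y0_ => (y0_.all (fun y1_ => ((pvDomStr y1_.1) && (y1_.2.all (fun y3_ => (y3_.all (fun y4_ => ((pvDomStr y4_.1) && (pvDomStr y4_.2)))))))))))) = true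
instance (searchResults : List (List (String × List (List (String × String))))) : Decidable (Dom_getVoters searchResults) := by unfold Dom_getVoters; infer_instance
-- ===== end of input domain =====

-- B replaces A's three staged passes (collect ids, set() dedup, dict comprehension) by a divide-and-conquer recursion: split in half, build each half's dict, merge with update; same values, similar cost.


-- ===== PORT A =====
-- Key lookups are ported with Dict.getD "" — Pre_getVoters guarantees the key is present,
-- so the "" default is never used on admitted inputs (Python raises KeyError there).
-- Python's list(set(res)) iterates in hash order, which PySem does not model; the port uses
-- PySem.Set.ofList (first occurrences) — the result is a dict, compared ignoring order.
def getVoters (searchResults : List (List (String × List (List (String × String))))) : List (String × List (String × Int)) :=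
  let res : List String :=
    searchResults.foldl (fun acc searchResult =>
      ((PySem.Dict.mk searchResult).getD "candidates" []).foldl (fun acc candidate =>
        if (PySem.Dict.mk candidate).contains "person_id" then
          acc ++ [(PySem.Dict.mk candidate).getD "person_id" ""]
        else
          acc ++ [(PySem.Dict.mk candidate).getD "id" ""]) acc) []
  let res2 : PySem.Set String := PySem.Set.ofList res
  res2.map (fun voter => (voter, [("similarity", (0 : Int)), ("vote", (0 : Int)), ("count", (0 : Int))]))

-- ===== PORT B =====
-- Divide and conquer: empty → {}; one searchResult → insert a zeroed entry per candidate key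
-- (overwrite dedups); otherwise split at mid = n // 2, recurse on both halves, merge with update.
def getVoters_alt (searchResults : List (List (String × List (List (String × String))))) : List (String × List (String × Int)) :=
  let n : Int := searchResults.length
  if _h0 : n = 0 then []
  else if _h1 : n = 1 then
    (((PySem.List.pyGet? searchResults 0).getD []
        |> (fun sr => ((PySem.Dict.mk sr).getD "candidates" []).foldl (fun d candidate =>
            let key := if (PySem.Dict.mk candidate).contains "person_id" then
                (PySem.Dict.mk candidate).getD "person_id" ""
              else
                (PySem.Dict.mk candidate).getD "id" ""
            d.insert key [("similarity", (0 : Int)), ("vote", (0 : Int)), ("count", (0 : Int))])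
          PySem.Dict.empty))).items
  else
    let mid : Int := PySem.Int.floordiv n 2
    ((PySem.Dict.mk (getVoters_alt (PySem.List.slice searchResults none (some mid)))).update
      (getVoters_alt (PySem.List.slice searchResults (some mid) none))).items
termination_by searchResults.length
decreasing_by
  · have hm : PySem.Int.floordiv (searchResults.length : Int) 2 = ((searchResults.length / 2 : Nat) : Int) := by
      exact_mod_cast PySem.Int.floordiv_natCast searchResults.length 2
    rw [hm, PySem.List.slice_to_natCast]
    simp only [List.length_take]
    omega
  · have hm : PySem.Int.floordiv (searchResults.length : Int) 2 = ((searchResults.length / 2 : Nat) : Int) := by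
      exact_mod_cast PySem.Int.floordiv_natCast searchResults.length 2
    rw [hm, PySem.List.slice_from_natCast]
    simp only [List.length_drop]
    omega

-- ===== PRECONDITION & SPEC =====
-- Pre_ excludes exactly the inputs where Python A raises KeyError: a searchResult with no
-- "candidates" key, or a candidate with neither "person_id" nor "id" key.
def Pre_getVoters (searchResults : List (List (String × List (List (String × String))))) : Prop :=
  ∀ searchResult ∈ searchResults,
    "candidates" ∈ searchResult.map Prod.fst ∧
    ∀ candidate ∈ (PySem.Dict.mk searchResult).getD "candidates" [],
      ("person_id" ∈ candidate.map Prod.fst ∨ "id" ∈ candidate.map Prod.fst)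
instance (searchResults : List (List (String × List (List (String × String))))) : Decidable (Pre_getVoters searchResults) := by unfold Pre_getVoters; infer_instance
def pvWitness_getVoters : (List (List (String × List (List (String × String))))) :=
  [[("candidates", [[("id", "x")], [("person_id", "p"), ("id", "y")]])]]
def Spec_getVoters (searchResults : List (List (String × List (List (String × String))))) (out : List (String × List (String × Int))) : Prop := out = getVoters_alt searchResults
instance (searchResults : List (List (String × List (List (String × String))))) (out : List (String × List (String × Int))) : Decidable (Spec_getVoters searchResults out) := by unfold Spec_getVoters; infer_instance

-- ===== CLAIM (what is proved, stated in full; the proofs are below) =====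
def Claim_equal_getVoters : Prop := ∀ (searchResults : List (List (String × List (List (String × String))))), Dom_getVoters searchResults → Pre_getVoters searchResults → Spec_getVoters searchResults (getVoters searchResults)

-- ===== LEMMAS AND PROOFS =====

-- the entry every voter maps to
def pvEntry : List (String × Int) := [("similarity", (0 : Int)), ("vote", (0 : Int)), ("count", (0 : Int))]

-- the key a candidate contributes
def pvKey (candidate : List (String × String)) : String :=
  if (PySem.Dict.mk candidate).contains "person_id" then
    (PySem.Dict.mk candidate).getD "person_id" ""
  else
    (PySem.Dict.mk candidate).getD "id" ""

-- all keys contributed by a list of searchResults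
def pvKeys (L : List (List (String × List (List (String × String))))) : List String :=
  L.flatMap (fun sr => ((PySem.Dict.mk sr).getD "candidates" []).map pvKey)

-- nested loop = loop over the flattened list
theorem foldl_foldl_flatMap {α β γ : Type} (f : β → α → β) (g : γ → List α) :
    ∀ (l : List γ) (init : β),
      l.foldl (fun acc x => (g x).foldl f acc) init = (l.flatMap g).foldl f init := by
  intro l
  induction l with
  | nil => intro init; simp
  | cons x xs ih => intro init; simp [List.flatMap_cons, List.foldl_append, ih]

-- inserting a key with the constant entry into a dict whose items are s.map (·, entry)
theorem insert_const_entry {V : Type} (entry : V) (s : List String) (x : String) :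
    (PySem.Dict.mk (s.map (fun v => (v, entry)))).insert x entry
      = PySem.Dict.mk ((PySem.Set.add s x).map (fun v => (v, entry))) := by
  apply PySem.Dict.ext
  by_cases hx : x ∈ s
  · rw [PySem.Dict.items_insert_of_contains]
    · rw [PySem.Set.add_of_mem hx]
      simp only []
      rw [List.map_map]
      apply List.map_congr_left
      intro v hv
      by_cases h : v = x <;> simp [h]
    · simp [PySem.Dict.contains_eq_decide_mem_keys, hx]
  · rw [PySem.Dict.items_insert_of_not_contains]
    · rw [PySem.Set.add_of_not_mem hx]
      simp
    · simp [PySem.Dict.contains_eq_decide_mem_keys, hx]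

-- a fold of constant-entry inserts has the Set.update of the keys as its items
theorem foldl_insert_const_entry {V : Type} (entry : V) :
    ∀ (ks s : List String),
      (ks.foldl (fun d x => d.insert x entry) (PySem.Dict.mk (s.map (fun v => (v, entry))))).items
        = (PySem.Set.update s ks).map (fun v => (v, entry)) := by
  intro ks
  induction ks with
  | nil => intro s; simp [PySem.Set.update_nil]
  | cons x xs ih =>
      intro s
      rw [PySem.Set.update_cons, List.foldl_cons, insert_const_entry, ih]

-- a fold of constant-entry inserts under a key function, from the empty dict
theorem items_foldl_insert_key {A V : Type} (key : A → String) (entry : V) (L : List A) :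
    (L.foldl (fun d c => d.insert (key c) entry) (PySem.Dict.mk [])).items
      = (PySem.Set.ofList (L.map key)).map (fun v => (v, entry)) := by
  have hm := List.foldl_map (f := key)
    (g := fun (d : PySem.Dict String V) x => d.insert x entry)
    (l := L) (init := PySem.Dict.mk ([] : List (String × V)))
  rw [← hm]
  have h := foldl_insert_const_entry entry (L.map key) []
  simpa [PySem.Set.update_nil_left] using h

-- updating a constant-entry dict with a constant-entry items list is Set.update on the keys
theorem update_const_entry {V : Type} (entry : V) (s t : List String) :
    ((PySem.Dict.mk (s.map (fun v => (v, entry)))).update (t.map (fun v => (v, entry)))).items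
      = (PySem.Set.update s t).map (fun v => (v, entry)) := by
  unfold PySem.Dict.update
  rw [List.foldl_map]
  exact foldl_insert_const_entry entry t s

-- updating one deduped key list with another dedups their concatenation
theorem update_ofList_ofList (a b : List String) :
    PySem.Set.update (PySem.Set.ofList a) (PySem.Set.ofList b) = PySem.Set.ofList (a ++ b) := by
  rw [PySem.Set.ofList_append, PySem.Set.update_eq_append_filter,
    PySem.Set.update_eq_append_filter, PySem.Set.ofList_ofList]

-- characterisation of B: its result is the constant-entry table over the deduped keys
theorem alt_eq (L : List (List (String × List (List (String × String))))) :
    getVoters_alt L = (PySem.Set.ofList (pvKeys L)).map (fun v => (v, pvEntry)) := by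
  induction hn : L.length using Nat.strong_induction_on generalizing L with
  | _ n ih =>
    rw [getVoters_alt]
    by_cases h0 : (L.length : Int) = 0
    · have : L = [] := List.eq_nil_of_length_eq_zero (by exact_mod_cast h0)
      subst this; simp [pvKeys, PySem.Set.ofList]
    · rw [dif_neg h0]
      by_cases h1 : (L.length : Int) = 1
      · rw [dif_pos h1]
        have hl1 : L.length = 1 := by exact_mod_cast h1
        obtain ⟨x, hx⟩ : ∃ x, L = [x] := List.length_eq_one_iff.mp hl1
        subst hx
        simp only [PySem.List.pyGet?_zero, List.getElem?_cons_zero, Option.getD_some]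
        have hemp : (PySem.Dict.empty : PySem.Dict String (List (String × Int))) = PySem.Dict.mk [] := rfl
        rw [hemp]
        have := items_foldl_insert_key (A := List (String × String)) pvKey pvEntry
          ((PySem.Dict.mk x).getD "candidates" [])
        simp only [pvKey, pvEntry] at this ⊢
        rw [this]
        simp [pvKeys]
      · rw [dif_neg h1]
        have hm : PySem.Int.floordiv (L.length : Int) 2 = ((L.length / 2 : Nat) : Int) := by
          exact_mod_cast PySem.Int.floordiv_natCast L.length 2
        rw [hm]
        simp only [PySem.List.slice_to_natCast, PySem.List.slice_from_natCast]
        have h0' : L.length ≠ 0 := by intro h; apply h0; exact_mod_cast h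
        have h1' : L.length ≠ 1 := by intro h; apply h1; exact_mod_cast h
        have hltake : (L.take (L.length / 2)).length < n := by
          simp only [List.length_take]; omega
        have hldrop : (L.drop (L.length / 2)).length < n := by
          simp only [List.length_drop]; omega
        rw [ih _ hltake _ rfl, ih _ hldrop _ rfl]
        have := update_const_entry pvEntry
          (PySem.Set.ofList (pvKeys (L.take (L.length / 2))))
          (PySem.Set.ofList (pvKeys (L.drop (L.length / 2))))
        rw [this]
        congr 1
        rw [update_ofList_ofList]
        unfold pvKeys
        rw [← List.flatMap_append, List.take_append_drop]

-- ===== VERDICT (by name: the statement is the Claim_ definition above) =====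
theorem getVoters_spec : Claim_equal_getVoters := by
  intro searchResults _ _
  unfold Spec_getVoters getVoters
  rw [alt_eq, foldl_foldl_flatMap]
  have hfun : (fun (acc : List String) (candidate : List (String × String)) =>
      if (PySem.Dict.mk candidate).contains "person_id" then
        acc ++ [(PySem.Dict.mk candidate).getD "person_id" ""]
      else acc ++ [(PySem.Dict.mk candidate).getD "id" ""])
      = (fun acc candidate => acc ++ [pvKey candidate]) := by
    funext acc c; unfold pvKey; split <;> rfl
  rw [hfun, PySem.List.foldl_append_singleton_eq_map]
  simp [pvKeys, pvEntry, List.flatMap_def, List.map_flatten, List.map_map, Function.comp_def]
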